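-- pv_equiv track=rewrite | github.com/chrisc66/microservice-analysis | src/repo_finder.py | _has_service_communication
-- ===== SOURCE A (Python) =====
-- from typing import List, Dict, Set, Optional, Generator
--
-- def _has_service_communication(paths: Set[str]) -> bool:
--     """Check if there's evidence of service-to-service communication."""
--     communication_indicators = {
--         'api', 'grpc', 'proto', 'swagger', 'openapi',
--         'kafka', 'rabbitmq', 'redis', 'queue', 'gateway',
--         'eureka', 'consul', 'registry', 'discovery',
--         'proxy', 'load-balancer', 'loadbalancer'
--     }
--
--     for path in paths:
--         for indicator in communication_indicators:
--             if indicator in path: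
--                 return True
--     return False
-- ===== SOURCE B (Python) =====
-- import re
--
-- _COMM_PATTERN = re.compile('|'.join(re.escape(i) for i in (
--     'api', 'grpc', 'proto', 'swagger', 'openapi',
--     'kafka', 'rabbitmq', 'redis', 'queue', 'gateway',
--     'eureka', 'consul', 'registry', 'discovery',
--     'proxy', 'load-balancer', 'loadbalancer')))
--
-- def _has_service_communication(paths):
--     """One compiled alternation regex; a single left-to-right scan per path."""
--     return any(_COMM_PATTERN.search(path) for path in paths)
-- ===== Notes on version B (the rewrite author's own statement) =====
-- stated objective: idiomatic
-- what changed: Replaces the explicit per-indicator inner loop with one precompiled alternation regex, so each path is checked by a single left-to-right scan that tries all alternatives at each position.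
import Mathlib
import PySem

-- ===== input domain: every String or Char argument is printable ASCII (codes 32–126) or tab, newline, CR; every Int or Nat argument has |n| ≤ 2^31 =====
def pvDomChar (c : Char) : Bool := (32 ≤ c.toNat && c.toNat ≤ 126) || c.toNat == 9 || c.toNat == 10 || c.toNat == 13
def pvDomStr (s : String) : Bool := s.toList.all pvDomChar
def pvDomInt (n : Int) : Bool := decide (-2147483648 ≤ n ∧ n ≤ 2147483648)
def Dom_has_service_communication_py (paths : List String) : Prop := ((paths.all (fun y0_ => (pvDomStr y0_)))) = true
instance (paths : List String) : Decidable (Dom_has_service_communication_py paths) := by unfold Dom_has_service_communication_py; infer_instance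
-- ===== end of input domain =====

-- B replaces A's per-indicator inner containment loop by one alternation-regex scan:
-- a single left-to-right pass over each path, trying every indicator as a prefix at each
-- position (objective: idiomatic single-scan search; same result, A's value reproduced).

-- ===== PORT A =====
-- the Python set literal of indicators (distinct strings; the boolean result does not
-- depend on the set's iteration order, so source order is used)
def commIndicatorsA : List String :=
  ["api", "grpc", "proto", "swagger", "openapi",
   "kafka", "rabbitmq", "redis", "queue", "gateway",
   "eureka", "consul", "registry", "discovery",
   "proxy", "load-balancer", "loadbalancer"]

def has_service_communication_py (paths : List String) : Bool :=
  -- for path in paths: for indicator in …: if indicator in path: return True / return False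
  paths.any (fun path => commIndicatorsA.any (fun ind => PySem.Str.isIn ind path))

-- ===== PORT B =====
-- the alternatives of the compiled regex (re.escape is the identity on these literals)
def commAlternativesB : List (List Char) :=
  ["api".toList, "grpc".toList, "proto".toList, "swagger".toList, "openapi".toList,
   "kafka".toList, "rabbitmq".toList, "redis".toList, "queue".toList, "gateway".toList,
   "eureka".toList, "consul".toList, "registry".toList, "discovery".toList,
   "proxy".toList, "load-balancer".toList, "loadbalancer".toList]

-- does some alternative match starting exactly here?
def regexMatchAt (cs : List Char) : Bool :=
  commAlternativesB.any (fun alt => alt.isPrefixOf cs)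

-- pattern.search: slide the match attempt one position at a time over the path
def regexSearch : List Char → Bool
  | [] => regexMatchAt []
  | c :: rest => regexMatchAt (c :: rest) || regexSearch rest

def has_service_communication_py_alt (paths : List String) : Bool :=
  paths.any (fun path => regexSearch path.toList)

-- ===== PRECONDITION & SPEC =====
def Spec_has_service_communication_py (paths : List String) (out : Bool) : Prop := out = has_service_communication_py_alt paths
instance (paths : List String) (out : Bool) : Decidable (Spec_has_service_communication_py paths out) := by unfold Spec_has_service_communication_py; infer_instance

-- ===== CLAIM (what is proved, stated in full; the proofs are below) =====
def Claim_equal_has_service_communication_py : Prop := ∀ (paths : List String), Dom_has_service_communication_py paths → Spec_has_service_communication_py paths (has_service_communication_py paths)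

-- ===== LEMMAS AND PROOFS =====

-- position-by-position scan finds a match iff some alternative is an infix
lemma regexSearch_iff (cs : List Char) :
    regexSearch cs = true ↔ ∃ alt ∈ commAlternativesB, alt <:+: cs := by
  induction cs with
  | nil =>
    simp [regexSearch, regexMatchAt, List.isPrefixOf_iff_prefix, List.infix_nil,
      List.prefix_nil]
  | cons c rest ih =>
    simp only [regexSearch, Bool.or_eq_true, ih, regexMatchAt, List.any_eq_true,
      List.isPrefixOf_iff_prefix]
    constructor
    · rintro (⟨a, ha, hp⟩ | ⟨a, ha, hi⟩)
      · exact ⟨a, ha, hp.isInfix⟩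
      · exact ⟨a, ha, hi.trans (List.infix_cons_iff.mpr (Or.inr List.infix_rfl))⟩
    · rintro ⟨a, ha, hi⟩
      rcases List.infix_cons_iff.mp hi with hp | hi'
      · exact Or.inl ⟨a, ha, hp⟩
      · exact Or.inr ⟨a, ha, hi'⟩

-- B's alternative list is exactly A's indicator list, read as character lists
lemma altB_eq : commAlternativesB = commIndicatorsA.map String.toList := by
  rfl

-- per path, A's inner indicator loop and B's regex scan agree
lemma per_path (p : String) :
    commIndicatorsA.any (fun ind => PySem.Str.isIn ind p) = regexSearch p.toList := by
  rw [Bool.eq_iff_iff, regexSearch_iff, altB_eq]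
  simp only [List.any_eq_true, PySem.Str.isIn_iff_infix, List.mem_map]
  constructor
  · rintro ⟨i, hi, h⟩
    exact ⟨i.toList, ⟨i, hi, rfl⟩, h⟩
  · rintro ⟨a, ⟨i, hi, rfl⟩, h⟩
    exact ⟨i, hi, h⟩

-- ===== VERDICT (by name: the statement is the Claim_ definition above) =====
theorem has_service_communication_py_spec : Claim_equal_has_service_communication_py := by
  intro paths _
  unfold Spec_has_service_communication_py has_service_communication_py has_service_communication_py_alt
  simp only [per_path]
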